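-- pv_equiv track=rewrite | github.com/davidyaps/programacion_1 | Trabajo práctico 3 - Cadenas de caracteres/tp03ej08.py | reemplazar
-- ===== SOURCE A (Python) =====
-- def reemplazar(cadena, busqueda, reemplazo):
--     lista = cadena.split()
--     resultado = ""
--
--     cantidad = 0
--     for palabra in lista:
--         if (palabra == busqueda):
--             resultado += reemplazo + " "
--             cantidad += 1
--         else:
--             resultado += palabra + " "
--
--     return resultado.rstrip(), cantidad
-- ===== SOURCE B (Python) =====
-- def reemplazar(cadena, busqueda, reemplazo):
--     # Character-level state machine: no split(); words are recognised on the fly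
--     # at whitespace boundaries, replaced/counted as they are flushed.
--     piezas, cantidad, palabra = [], 0, ""
--     for c in cadena:
--         if c.isspace():
--             if palabra:
--                 if palabra == busqueda:
--                     piezas.append(reemplazo)
--                     cantidad += 1
--                 else:
--                     piezas.append(palabra)
--                 palabra = ""
--         else:
--             palabra += c
--     if palabra:
--         if palabra == busqueda:
--             piezas.append(reemplazo)
--             cantidad += 1
--         else:
--             piezas.append(palabra)
--     return " ".join(piezas).rstrip(), cantidad
-- ===== Notes on version B (the rewrite author's own statement) =====
-- stated objective: alternative
-- what changed: A tokenises with str.split() and then loops over the word list accumulating the output string and counter; B never calls split(): it is a character-level state machine that scans cadena once, building the current word char by char and flushing it (replaced and counted, or kept) at each whitespace boundary, joining the flushed pieces at the end.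
import Mathlib
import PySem

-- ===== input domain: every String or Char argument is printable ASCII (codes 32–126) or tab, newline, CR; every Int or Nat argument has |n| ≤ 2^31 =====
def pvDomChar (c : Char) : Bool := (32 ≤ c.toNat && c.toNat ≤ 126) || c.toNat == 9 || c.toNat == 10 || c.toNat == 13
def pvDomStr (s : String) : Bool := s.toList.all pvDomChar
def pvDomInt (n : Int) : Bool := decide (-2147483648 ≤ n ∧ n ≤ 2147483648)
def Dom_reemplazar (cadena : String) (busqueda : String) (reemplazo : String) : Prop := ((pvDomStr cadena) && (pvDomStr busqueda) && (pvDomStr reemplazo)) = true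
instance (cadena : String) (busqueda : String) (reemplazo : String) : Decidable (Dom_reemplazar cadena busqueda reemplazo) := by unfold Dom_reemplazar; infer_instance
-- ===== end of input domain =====

-- B replaces A's split-then-loop (accumulating output string and counter over the word list) by a
-- character-level state machine that recognises, replaces and counts words on the fly; objective: alternative.


-- ===== PORT A =====
-- port of A: the loop's string accumulator is carried as List Char (Lean's String.append is
-- kernel-opaque); otherwise step for step: split, fold appending word-or-replacement plus " "
-- while counting, final rstrip.
def reemplazar (cadena : String) (busqueda : String) (reemplazo : String) : String × Int :=
  let lista := PySem.Str.split₀ cadena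
  let st := lista.foldl (fun (st : List Char × Int) palabra =>
      if palabra == busqueda then (st.1 ++ reemplazo.toList ++ [' '], st.2 + 1)
      else (st.1 ++ palabra.toList ++ [' '], st.2)) ([], 0)
  (String.ofList (PySem.Chars.rstrip st.1), st.2)

-- ===== PORT B =====
-- port of B's character loop: state = (current word as List Char, flushed pieces, counter);
-- the current word is carried as List Char (String.push/append are kernel-opaque), each branch
-- mirrors Source B's loop body, the [] case is Source B's final flush after the loop.
def reemplazarScan (busqueda reemplazo : String) :
    List Char → List Char → List String → Int → List String × Int
  | [], palabra, piezas, cantidad =>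
      if palabra.isEmpty then (piezas, cantidad)
      else if String.ofList palabra == busqueda then (piezas ++ [reemplazo], cantidad + 1)
      else (piezas ++ [String.ofList palabra], cantidad)
  | c :: rest, palabra, piezas, cantidad =>
      if PySem.Chars.isspace c then
        if palabra.isEmpty then
          reemplazarScan busqueda reemplazo rest [] piezas cantidad
        else if String.ofList palabra == busqueda then
          reemplazarScan busqueda reemplazo rest [] (piezas ++ [reemplazo]) (cantidad + 1)
        else
          reemplazarScan busqueda reemplazo rest [] (piezas ++ [String.ofList palabra]) cantidad
      else
        reemplazarScan busqueda reemplazo rest (palabra ++ [c]) piezas cantidad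

def reemplazar_alt (cadena : String) (busqueda : String) (reemplazo : String) : String × Int :=
  let st := reemplazarScan busqueda reemplazo cadena.toList [] [] 0
  (PySem.Str.rstrip (PySem.Str.join " " st.1), st.2)

-- ===== PRECONDITION & SPEC =====
def Spec_reemplazar (cadena : String) (busqueda : String) (reemplazo : String) (out : String × Int) : Prop := out = reemplazar_alt cadena busqueda reemplazo
instance (cadena : String) (busqueda : String) (reemplazo : String) (out : String × Int) : Decidable (Spec_reemplazar cadena busqueda reemplazo out) := by unfold Spec_reemplazar; infer_instance

-- ===== CLAIM (what is proved, stated in full; the proofs are below) =====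
def Claim_equal_reemplazar : Prop := ∀ (cadena : String) (busqueda : String) (reemplazo : String), Dom_reemplazar cadena busqueda reemplazo → Spec_reemplazar cadena busqueda reemplazo (reemplazar cadena busqueda reemplazo)

-- ===== LEMMAS AND PROOFS =====

-- ' ' is whitespace, so rstripping a string with one trailing blank rstrips the string itself
theorem rstrip_append_space (x : List Char) :
    PySem.Chars.rstrip (x ++ [' ']) = PySem.Chars.rstrip x := by
  simp [PySem.Chars.rstrip, PySem.Chars.isspace]

-- A's concatenation "each word plus a blank" is the join by blanks plus one trailing blank (nonempty case)
theorem flatten_space_eq_intercalate (ws : List (List Char)) (h : ws ≠ []) :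
    (ws.map (· ++ [' '])).flatten = List.intercalate [' '] ws ++ [' '] := by
  induction ws with
  | nil => simp at h
  | cons w ws ih =>
    cases ws with
    | nil => simp [List.intercalate]
    | cons v vs =>
      rw [show (List.map (· ++ [' ']) (w :: v :: vs)).flatten
            = w ++ [' '] ++ (List.map (· ++ [' ']) (v :: vs)).flatten by simp,
        ih (by simp)]
      simp [List.intercalate, List.intersperse]

-- A's loop: the accumulated string is the flatten of word-plus-blank pieces, the counter counts matches
theorem foldl_loop (busqueda reemplazo : String) (l : List String) (acc : List Char) (c : Int) :
    l.foldl (fun (st : List Char × Int) palabra =>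
      if palabra == busqueda then (st.1 ++ reemplazo.toList ++ [' '], st.2 + 1)
      else (st.1 ++ palabra.toList ++ [' '], st.2)) (acc, c)
    = (acc ++ (l.map (fun p => (if p == busqueda then reemplazo else p).toList ++ [' '])).flatten,
       c + l.count busqueda) := by
  induction l generalizing acc c with
  | nil => simp
  | cons x xs ih =>
    by_cases hx : x == busqueda
    · simp only [List.foldl_cons, if_pos, ih, List.map_cons, List.flatten_cons,
        List.count_cons, eq_of_beq hx, BEq.rfl]
      exact Prod.ext (by simp) (by push_cast; ring)
    · simp only [List.foldl_cons, if_neg, Bool.false_eq_true, not_false_eq_true, ih,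
        List.map_cons, List.flatten_cons, List.count_cons, hx]
      simp

-- split₀.go's word accumulator is independent of the already-finished words
theorem split₀_go_acc (s : List Char) (cur : List Char) (acc : List (List Char)) :
    PySem.Chars.split₀.go s cur acc = acc.reverse ++ PySem.Chars.split₀.go s cur [] := by
  induction s generalizing cur acc with
  | nil =>
    by_cases h : cur.isEmpty <;> simp [PySem.Chars.split₀.go, h]
  | cons c rest ih =>
    by_cases hs : PySem.Chars.isspace c
    · by_cases h : cur.isEmpty
      · rw [show PySem.Chars.split₀.go (c :: rest) cur acc
              = PySem.Chars.split₀.go rest [] acc by simp [PySem.Chars.split₀.go, hs, h],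
          show PySem.Chars.split₀.go (c :: rest) cur []
              = PySem.Chars.split₀.go rest [] [] by simp [PySem.Chars.split₀.go, hs, h]]
        exact ih [] acc
      · rw [show PySem.Chars.split₀.go (c :: rest) cur acc
              = PySem.Chars.split₀.go rest [] (cur.reverse :: acc) by
            simp [PySem.Chars.split₀.go, hs, h],
          show PySem.Chars.split₀.go (c :: rest) cur []
              = PySem.Chars.split₀.go rest [] [cur.reverse] by
            simp [PySem.Chars.split₀.go, hs, h],
          ih, ih [] [cur.reverse]]
        simp
    · simp only [show ∀ a, PySem.Chars.split₀.go (c :: rest) cur a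
          = PySem.Chars.split₀.go rest (c :: cur) a by
            intro a; simp [PySem.Chars.split₀.go, hs]]
      exact ih _ _

-- B's scan, characterised by the words split₀.go still has to produce: it appends their
-- replaced images to the flushed pieces and adds the number of matches to the counter
theorem scan_eq (busqueda reemplazo : String) (s palabra : List Char)
    (piezas : List String) (cantidad : Int) :
    reemplazarScan busqueda reemplazo s palabra piezas cantidad
    = (piezas ++ ((PySem.Chars.split₀.go s palabra.reverse []).map
          (fun w => if String.ofList w == busqueda then reemplazo else String.ofList w)),
       cantidad + ((PySem.Chars.split₀.go s palabra.reverse []).map String.ofList).count busqueda) := by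
  induction s generalizing palabra piezas cantidad with
  | nil =>
    by_cases h : palabra.isEmpty
    · simp [reemplazarScan, PySem.Chars.split₀.go, h]
    · by_cases hb : String.ofList palabra == busqueda
      · simp [reemplazarScan, PySem.Chars.split₀.go, h, eq_of_beq hb]
      · have hbe : ¬ String.ofList palabra = busqueda := fun hh => hb (beq_iff_eq.mpr hh)
        simp [reemplazarScan, PySem.Chars.split₀.go, h, hbe]
  | cons c rest ih =>
    by_cases hs : PySem.Chars.isspace c
    · by_cases h : palabra.isEmpty
      · have hp : palabra = [] := by cases palabra <;> simp_all
        simp [reemplazarScan, PySem.Chars.split₀.go, hs, hp, ih]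
      · rw [show reemplazarScan busqueda reemplazo (c :: rest) palabra piezas cantidad
              = if String.ofList palabra == busqueda then
                  reemplazarScan busqueda reemplazo rest [] (piezas ++ [reemplazo]) (cantidad + 1)
                else reemplazarScan busqueda reemplazo rest [] (piezas ++ [String.ofList palabra]) cantidad by
            simp [reemplazarScan, hs, h],
          show PySem.Chars.split₀.go (c :: rest) palabra.reverse []
              = PySem.Chars.split₀.go rest [] [palabra.reverse.reverse] by
            simp only [PySem.Chars.split₀.go]
            rw [if_pos hs, if_neg (by simpa using h)],
          split₀_go_acc]
        by_cases hb : String.ofList palabra == busqueda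
        · simp [ih, eq_of_beq hb]
          push_cast; ring
        · have hbe : ¬ String.ofList palabra = busqueda := fun hh => hb (beq_iff_eq.mpr hh)
          simp [ih, hbe, List.count_cons]
    · rw [show reemplazarScan busqueda reemplazo (c :: rest) palabra piezas cantidad
            = reemplazarScan busqueda reemplazo rest (palabra ++ [c]) piezas cantidad by
          simp [reemplazarScan, hs],
        show PySem.Chars.split₀.go (c :: rest) palabra.reverse []
            = PySem.Chars.split₀.go rest (c :: palabra.reverse) [] by
          simp [PySem.Chars.split₀.go, hs],
        ih, List.reverse_append]
      simp

-- ===== VERDICT (by name: the statement is the Claim_ definition above) =====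
theorem reemplazar_spec : Claim_equal_reemplazar := by
  intro cadena busqueda reemplazo _
  unfold Spec_reemplazar reemplazar reemplazar_alt
  simp only [foldl_loop, scan_eq, List.nil_append, List.reverse_nil, Int.zero_add]
  have hsplit : PySem.Str.split₀ cadena
      = (PySem.Chars.split₀.go cadena.toList [] []).map String.ofList := by
    simp [PySem.Str.split₀, PySem.Chars.split₀]
  refine Prod.ext ?_ (by simp [hsplit])
  apply String.toList_injective
  simp only [PySem.Str.toList_rstrip, PySem.Str.toList_join, String.toList_ofList, hsplit]
  cases hl : PySem.Chars.split₀.go cadena.toList [] [] with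
  | nil => simp [List.intercalate, PySem.Chars.join]
  | cons w ws =>
    rw [show List.map (fun p => (if (p == busqueda) = true then reemplazo else p).toList ++ [' '])
          ((w :: ws).map String.ofList)
        = (((w :: ws).map String.ofList).map
            (fun p => (if (p == busqueda) = true then reemplazo else p).toList)).map
            (· ++ [' ']) by simp [List.map_map, Function.comp_def],
      flatten_space_eq_intercalate _ (by simp), rstrip_append_space]
    simp [PySem.Chars.join, List.map_map, Function.comp_def, apply_ite String.toList]
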